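-- pv_equiv track=rewrite | github.com/shriyam052003/NeuroCluster-AI | backend/services/ml_service.py | map_to_big_five
-- ===== SOURCE A (Python) =====
-- from typing import List, Dict, Any
--
-- def map_to_big_five(dominant_emotion: str, keywords: List[str]) -> Dict[str, float]:
--     base = {"O": 50, "C": 50, "E": 50, "A": 50, "N": 50}
--     if dominant_emotion == "Analytical":
--         base["C"] += 20; base["O"] += 10; base["N"] -= 10
--     elif dominant_emotion == "Emotional":
--         base["N"] += 30; base["A"] += 10
--     elif dominant_emotion == "Social":
--         base["E"] += 30; base["A"] += 20; base["O"] += 10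
--     elif dominant_emotion == "Aggressive":
--         base["N"] += 20; base["A"] -= 30; base["E"] += 10
--
--     for kw in keywords:
--         if kw in ["data", "system", "logic"]: base["C"] += 5
--         if kw in ["friends", "party"]: base["E"] += 5
--         if kw in ["hate", "stupid"]: base["A"] -= 5; base["N"] += 5
--
--     return {k: max(0, min(100, v)) for k, v in base.items()}
-- ===== SOURCE B (Python) =====
-- from typing import List, Dict
-- from collections import Counter
--
-- _EMO = {
--     "Analytical": {"O": 10, "C": 20, "N": -10},
--     "Emotional": {"N": 30, "A": 10},
--     "Social": {"E": 30, "A": 20, "O": 10},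
--     "Aggressive": {"N": 20, "A": -30, "E": 10},
-- }
--
-- def map_to_big_five(dominant_emotion: str, keywords: List[str]) -> Dict[str, float]:
--     cnt = Counter(keywords)
--     c = 5 * (cnt["data"] + cnt["system"] + cnt["logic"])
--     e = 5 * (cnt["friends"] + cnt["party"])
--     h = 5 * (cnt["hate"] + cnt["stupid"])
--     kw_adj = {"C": c, "E": e, "A": -h, "N": h}
--     emo = _EMO.get(dominant_emotion, {})
--     return {t: max(0, min(100, 50 + emo.get(t, 0) + kw_adj.get(t, 0)))
--             for t in ("O", "C", "E", "A", "N")}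
-- ===== Notes on version B (the rewrite author's own statement) =====
-- stated objective: alternative
-- what changed: Replaces the per-keyword branching loop over the dict by a Counter-built frequency table whose relevant counts are aggregated once into per-trait adjustments, combined with a static emotion-adjustment table instead of the if/elif chain.
import Mathlib
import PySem

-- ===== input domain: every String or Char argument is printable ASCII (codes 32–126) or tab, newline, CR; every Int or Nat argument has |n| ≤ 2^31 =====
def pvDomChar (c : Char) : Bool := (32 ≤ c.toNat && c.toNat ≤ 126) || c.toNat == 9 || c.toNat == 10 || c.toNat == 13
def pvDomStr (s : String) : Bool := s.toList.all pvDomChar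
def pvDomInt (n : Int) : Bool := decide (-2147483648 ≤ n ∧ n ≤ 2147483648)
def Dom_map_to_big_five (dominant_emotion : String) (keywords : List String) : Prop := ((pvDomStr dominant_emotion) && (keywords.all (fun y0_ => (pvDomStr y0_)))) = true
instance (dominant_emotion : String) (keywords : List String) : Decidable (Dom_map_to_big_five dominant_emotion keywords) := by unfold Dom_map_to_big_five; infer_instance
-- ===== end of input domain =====

-- B replaces A's per-keyword branching loop by aggregated Counter counts and an emotion table; same O(n) cost.

-- ===== PORT A =====
-- the dict's five values in insertion order (O, C, E, A, N); the final comprehension's clamp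
def pvClampA (v : Int) : Int := max 0 (min 100 v)

-- one iteration of A's 'for kw in keywords' loop, branches in source order
def pvStepA (s : Int × Int × Int × Int × Int) (kw : String) : Int × Int × Int × Int × Int :=
  let s1 := if kw = "data" ∨ kw = "system" ∨ kw = "logic" then
              (s.1, s.2.1 + 5, s.2.2.1, s.2.2.2.1, s.2.2.2.2) else s
  let s2 := if kw = "friends" ∨ kw = "party" then
              (s1.1, s1.2.1, s1.2.2.1 + 5, s1.2.2.2.1, s1.2.2.2.2) else s1
  if kw = "hate" ∨ kw = "stupid" then
    (s2.1, s2.2.1, s2.2.2.1, s2.2.2.2.1 - 5, s2.2.2.2.2 + 5) else s2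

def map_to_big_five (dominant_emotion : String) (keywords : List String) : List (String × Int) :=
  let base : Int × Int × Int × Int × Int := (50, 50, 50, 50, 50)
  let base :=
    if dominant_emotion = "Analytical" then
      (base.1 + 10, base.2.1 + 20, base.2.2.1, base.2.2.2.1, base.2.2.2.2 - 10)
    else if dominant_emotion = "Emotional" then
      (base.1, base.2.1, base.2.2.1, base.2.2.2.1 + 10, base.2.2.2.2 + 30)
    else if dominant_emotion = "Social" then
      (base.1 + 10, base.2.1, base.2.2.1 + 30, base.2.2.2.1 + 20, base.2.2.2.2)
    else if dominant_emotion = "Aggressive" then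
      (base.1, base.2.1, base.2.2.1 + 10, base.2.2.2.1 - 30, base.2.2.2.2 + 20)
    else base
  let f := keywords.foldl pvStepA base
  [("O", pvClampA f.1), ("C", pvClampA f.2.1), ("E", pvClampA f.2.2.1),
   ("A", pvClampA f.2.2.2.1), ("N", pvClampA f.2.2.2.2)]

-- ===== PORT B =====
-- Source B's _EMO table read through .get (missing key / trait = 0), as (O, C, E, A, N) deltas
def pvEmoB (de : String) : Int × Int × Int × Int × Int :=
  if de = "Analytical" then (10, 20, 0, 0, -10)
  else if de = "Emotional" then (0, 0, 0, 10, 30)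
  else if de = "Social" then (10, 0, 30, 20, 0)
  else if de = "Aggressive" then (0, 0, 10, -30, 20)
  else (0, 0, 0, 0, 0)

-- Counter(keywords)[w] = keywords.count(w)
def pvCnt (keywords : List String) (w : String) : Int := (keywords.count w : Int)

def map_to_big_five_alt (dominant_emotion : String) (keywords : List String) : List (String × Int) :=
  let c := 5 * (pvCnt keywords "data" + pvCnt keywords "system" + pvCnt keywords "logic")
  let e := 5 * (pvCnt keywords "friends" + pvCnt keywords "party")
  let h := 5 * (pvCnt keywords "hate" + pvCnt keywords "stupid")
  let emo := pvEmoB dominant_emotion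
  [("O", max 0 (min 100 (50 + emo.1))),
   ("C", max 0 (min 100 (50 + emo.2.1 + c))),
   ("E", max 0 (min 100 (50 + emo.2.2.1 + e))),
   ("A", max 0 (min 100 (50 + emo.2.2.2.1 + (-h)))),
   ("N", max 0 (min 100 (50 + emo.2.2.2.2 + h)))]

-- ===== PRECONDITION & SPEC =====
def Spec_map_to_big_five (dominant_emotion : String) (keywords : List String) (out : List (String × Int)) : Prop := out = map_to_big_five_alt dominant_emotion keywords
instance (dominant_emotion : String) (keywords : List String) (out : List (String × Int)) : Decidable (Spec_map_to_big_five dominant_emotion keywords out) := by unfold Spec_map_to_big_five; infer_instance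

-- ===== CLAIM (what is proved, stated in full; the proofs are below) =====
def Claim_equal_map_to_big_five : Prop := ∀ (dominant_emotion : String) (keywords : List String), Dom_map_to_big_five dominant_emotion keywords → Spec_map_to_big_five dominant_emotion keywords (map_to_big_five dominant_emotion keywords)

-- ===== LEMMAS AND PROOFS =====

-- 1 if kw = w else 0: the contribution of one keyword to one count
def pvInd (kw w : String) : Int := if kw = w then 1 else 0

lemma pvCnt_cons (k w : String) (l : List String) :
    pvCnt (k :: l) w = pvCnt l w + pvInd k w := by
  by_cases h : k = w <;> simp [pvCnt, pvInd, h]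

-- one step of A's loop adds 5 times the keyword's indicator to each affected trait
lemma stepA_closed (o c e a n : Int) (kw : String) :
    pvStepA (o, c, e, a, n) kw =
      (o, c + 5 * (pvInd kw "data" + pvInd kw "system" + pvInd kw "logic"),
       e + 5 * (pvInd kw "friends" + pvInd kw "party"),
       a - 5 * (pvInd kw "hate" + pvInd kw "stupid"),
       n + 5 * (pvInd kw "hate" + pvInd kw "stupid")) := by
  by_cases h1 : kw = "data"
  · subst h1; simp [pvStepA, pvInd]
  by_cases h2 : kw = "system"
  · subst h2; simp [pvStepA, pvInd]
  by_cases h3 : kw = "logic"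
  · subst h3; simp [pvStepA, pvInd]
  by_cases h4 : kw = "friends"
  · subst h4; simp [pvStepA, pvInd]
  by_cases h5 : kw = "party"
  · subst h5; simp [pvStepA, pvInd]
  by_cases h6 : kw = "hate"
  · subst h6; simp [pvStepA, pvInd]
  by_cases h7 : kw = "stupid"
  · subst h7; simp [pvStepA, pvInd]
  simp [pvStepA, pvInd, h1, h2, h3, h4, h5, h6, h7]

-- closed form of A's whole keyword loop: it shifts C/E/A/N by 5 times the relevant counts
lemma foldA_closed (keywords : List String) (o c e a n : Int) :
    keywords.foldl pvStepA (o, c, e, a, n) =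
      (o, c + 5 * (pvCnt keywords "data" + pvCnt keywords "system" + pvCnt keywords "logic"),
       e + 5 * (pvCnt keywords "friends" + pvCnt keywords "party"),
       a - 5 * (pvCnt keywords "hate" + pvCnt keywords "stupid"),
       n + 5 * (pvCnt keywords "hate" + pvCnt keywords "stupid")) := by
  induction keywords generalizing o c e a n with
  | nil => simp [pvCnt]
  | cons kw rest ih =>
    rw [List.foldl_cons, stepA_closed, ih]
    simp only [pvCnt_cons, Prod.mk.injEq]
    exact ⟨trivial, by ring, by ring, by ring, by ring⟩

-- ===== VERDICT (by name: the statement is the Claim_ definition above) =====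
theorem map_to_big_five_spec : Claim_equal_map_to_big_five := by
  intro de kws _
  unfold Spec_map_to_big_five map_to_big_five map_to_big_five_alt pvEmoB pvClampA
  split_ifs <;>
    simp only [foldA_closed, List.cons.injEq, Prod.mk.injEq] <;>
    and_intros <;> trivial
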